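-- pv_equiv track=rewrite | github.com/hogan-tech/leetcode-solution | Python/3752-lexicographically-smallest-negated-permutation-that-sums-to-target.py | lexSmallestNegatedPerm
-- ===== SOURCE A (Python) =====
-- from typing import List
--
-- def lexSmallestNegatedPerm(n: int, target: int) -> List[int]:
--     S = n * (n + 1) // 2
--     if (S - target) < 0 or (S - target) % 2 != 0:
--         return []
--     sumPNeg = (S - target) // 2
--     if sumPNeg < 0 or sumPNeg > S:
--         return []
--     pNeg = set()
--     currSum = 0
--
--     for i in range(n, 0, -1):
--         if currSum + i <= sumPNeg:
--             pNeg.add(i)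
--             currSum += i
--     if currSum != sumPNeg:
--         return []
--     pNegList = sorted(list(pNeg), reverse=True)
--     pPosSet = set(range(1, n + 1)) - pNeg
--     pPosList = sorted(list(pPosSet), reverse=True)
--     result = []
--     for _ in range(n):
--         candidateNeg = float('inf')
--         if pNegList:
--             candidateNeg = -pNegList[0]
--         candidatePos = float('inf')
--         if pPosList:
--             candidatePos = pPosList[-1]
--         if candidateNeg <= candidatePos:
--             result.append(candidateNeg)
--             pNegList.pop(0)
--         else:
--             result.append(candidatePos)
--             pPosList.pop()
--     return result
-- ===== SOURCE B (Python) =====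
-- from typing import List
--
-- def lexSmallestNegatedPerm(n: int, target: int) -> List[int]:
--     S = n * (n + 1) // 2
--     d = S - target
--     if d < 0 or d % 2 != 0:
--         return []
--     m = d // 2
--     if m > S:
--         return []
--     # Greedy from the top: negate n, n-1, ... while they fit, then one residual value.
--     neg = []
--     rem = m
--     i = n
--     while i >= 1 and rem >= i:
--         neg.append(-i)
--         rem -= i
--         i -= 1
--     if rem > 0:
--         if i < 1:
--             return []
--         neg.append(-rem)
--     return neg + [j for j in range(1, i + 1) if j != rem]
-- ===== Notes on version B (the rewrite author's own statement) =====
-- stated objective: alternative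
-- what changed: Replaces A's set construction, two sorts, set difference and pop(0)/pop() merge loop by a single greedy countdown loop that emits the negated block directly, appends the single residual negated value, and lists the remaining positives ascending with one comprehension.
import Mathlib
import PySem

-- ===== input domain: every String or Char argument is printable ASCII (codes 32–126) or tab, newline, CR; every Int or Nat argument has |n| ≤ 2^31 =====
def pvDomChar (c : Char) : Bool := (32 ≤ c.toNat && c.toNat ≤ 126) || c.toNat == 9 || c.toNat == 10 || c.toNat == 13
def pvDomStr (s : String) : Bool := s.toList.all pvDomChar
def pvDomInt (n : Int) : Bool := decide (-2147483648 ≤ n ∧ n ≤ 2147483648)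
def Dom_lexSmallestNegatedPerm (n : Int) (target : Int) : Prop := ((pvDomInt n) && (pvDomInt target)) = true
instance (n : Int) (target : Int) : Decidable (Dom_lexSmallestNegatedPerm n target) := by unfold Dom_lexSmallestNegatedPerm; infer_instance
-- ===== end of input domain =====

-- B replaces A's set building, two sorts, set difference and pop(0)/pop() merge loop
-- by a single greedy countdown loop that emits the answer directly (objective: alternative).


-- ===== PORT A =====
-- the body of A's first for-loop (greedy selection into the set pNeg with running sum)
def greedyStep (sumPNeg : Int) (sc : PySem.Set Int × Int) (i : Int) : PySem.Set Int × Int :=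
  if sc.2 + i ≤ sumPNeg then (PySem.Set.add sc.1 i, sc.2 + i) else sc

-- the body of A's second for-loop; candidateNeg/candidatePos use float('inf') for an empty
-- list, which resolves by case analysis on emptiness; the ([], []) case is unreachable
-- within the range(n) iterations (Python would raise IndexError there): state kept unchanged.
def mergeStep (st : List Int × List Int × List Int) : List Int × List Int × List Int :=
  match st with
  | (result, [], []) => (result, [], [])
  | (result, x :: xs, []) => (result ++ [-x], xs, [])
  | (result, [], p :: ps) =>
      (result ++ [(p :: ps).getLast (by simp)], [], (p :: ps).dropLast)
  | (result, x :: xs, p :: ps) =>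
      if -x ≤ (p :: ps).getLast (by simp) then (result ++ [-x], xs, p :: ps)
      else (result ++ [(p :: ps).getLast (by simp)], x :: xs, (p :: ps).dropLast)

def lexSmallestNegatedPerm (n : Int) (target : Int) : List Int :=
  let S := PySem.Int.floordiv (n * (n + 1)) 2
  if S - target < 0 ∨ PySem.Int.mod (S - target) 2 ≠ 0 then [] else
  let sumPNeg := PySem.Int.floordiv (S - target) 2
  if sumPNeg < 0 ∨ sumPNeg > S then [] else
  let st := (PySem.List.pyRange n 0 (-1)).foldl (greedyStep sumPNeg) (PySem.Set.empty, 0)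
  if st.2 ≠ sumPNeg then [] else
  let pNegList := PySem.List.sorted st.1 (fun x => x) true
  let pPosList := PySem.List.sorted
      (PySem.Set.diff (PySem.Set.ofList (PySem.List.pyRange 1 (n + 1) 1)) st.1) (fun x => x) true
  let fin := (PySem.List.pyRange 0 n 1).foldl (fun st _ => mergeStep st) ([], pNegList, pPosList)
  fin.1

-- ===== PORT B =====
-- Source B's while loop, structurally; fuel i.toNat is exact: the guard needs 1 ≤ i and i
-- drops by exactly 1 each pass, so fuel 0 coincides with the guard being false.
def altGo : Nat → Int → Int → List Int → List Int × Int × Int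
  | 0, i, rem, neg => (neg, i, rem)
  | f + 1, i, rem, neg =>
      if 1 ≤ i ∧ i ≤ rem then altGo f (i - 1) (rem - i) (neg ++ [-i]) else (neg, i, rem)

def altLoop (i rem : Int) (neg : List Int) : List Int × Int × Int :=
  altGo i.toNat i rem neg

def lexSmallestNegatedPerm_alt (n : Int) (target : Int) : List Int :=
  let S := PySem.Int.floordiv (n * (n + 1)) 2
  let d := S - target
  if d < 0 ∨ PySem.Int.mod d 2 ≠ 0 then [] else
  let m := PySem.Int.floordiv d 2
  if m > S then [] else
  match altLoop n m [] with
  | (neg, i, rem) =>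
    if 0 < rem then
      if i < 1 then []
      else (neg ++ [-rem]) ++ (PySem.List.pyRange 1 (i + 1) 1).filter (fun j => j != rem)
    else neg ++ (PySem.List.pyRange 1 (i + 1) 1).filter (fun j => j != rem)

-- ===== PRECONDITION & SPEC =====
def Spec_lexSmallestNegatedPerm (n : Int) (target : Int) (out : List Int) : Prop := out = lexSmallestNegatedPerm_alt n target
instance (n : Int) (target : Int) (out : List Int) : Decidable (Spec_lexSmallestNegatedPerm n target out) := by unfold Spec_lexSmallestNegatedPerm; infer_instance

-- ===== CLAIM (what is proved, stated in full; the proofs are below) =====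
def Claim_equal_lexSmallestNegatedPerm : Prop := ∀ (n : Int) (target : Int), Dom_lexSmallestNegatedPerm n target → Spec_lexSmallestNegatedPerm n target (lexSmallestNegatedPerm n target)

-- ===== LEMMAS AND PROOFS =====

-- sorted(list(pNeg), reverse=True) of the countdown block (plus the residual) is itself
theorem pw_negBlock (a b : Int) : (PySem.List.pyRange a b (-1)).Pairwise (fun x y : Int => y ≤ x) := by
  rw [PySem.List.pyRange_neg_one_eq_reverse]
  exact List.pairwise_reverse.mpr ((PySem.List.pairwise_lt_pyRange_one _ _).imp (fun h => le_of_lt h))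

theorem length_filter_lt {l : List Int} {p : Int → Bool} {x : Int} (h : x ∈ l) (hp : p x = false) :
    (l.filter p).length < l.length := by
  obtain ⟨l1, l2, rfl⟩ := List.append_of_mem h
  simp [List.filter_append, hp]
  have := List.length_filter_le p l1
  have := List.length_filter_le p l2
  omega

-- altGo only appends to its accumulator
theorem altGo_acc (f : Nat) : ∀ (i rem : Int) (neg : List Int),
    altGo f i rem neg = (neg ++ (altGo f i rem []).1, (altGo f i rem []).2) := by
  induction f with
  | zero => intro i rem neg; simp [altGo]
  | succ f ih =>
    intro i rem neg
    by_cases h : 1 ≤ i ∧ i ≤ rem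
    · simp only [altGo, if_pos h]
      rw [ih (i - 1) (rem - i) (neg ++ [-i]), ih (i - 1) (rem - i) ([] ++ [-i])]
      simp
    · simp [altGo, h]

-- structure of the loop's result: the taken values are the countdown block i, i-1, …, i'+1,
-- the final rem is nonnegative, and the guard fails at the final state
theorem altGo_spec (f : Nat) : ∀ (i rem : Int), i ≤ (f : Int) → 0 ≤ rem →
    (altGo f i rem []).1
      = (PySem.List.pyRange i (altGo f i rem []).2.1 (-1)).map (fun x => -x) ∧
    (altGo f i rem []).2.1 ≤ i ∧
    (0 ≤ i → 0 ≤ (altGo f i rem []).2.1) ∧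
    0 ≤ (altGo f i rem []).2.2 ∧
    ¬(1 ≤ (altGo f i rem []).2.1 ∧ (altGo f i rem []).2.1 ≤ (altGo f i rem []).2.2) ∧
    (i < 1 → (altGo f i rem []).2.1 = i) := by
  induction f with
  | zero =>
    intro i rem hf hr
    refine ⟨?_, le_refl _, fun _ => ?_, hr, fun hc => ?_, fun _ => rfl⟩ <;>
      simp [altGo, PySem.List.pyRange_neg_one_eq_nil le_rfl] at * <;> omega
  | succ f ih =>
    intro i rem hf hr
    by_cases h : 1 ≤ i ∧ i ≤ rem
    · have hrw : altGo (f + 1) i rem [] = ((-i) :: (altGo f (i - 1) (rem - i) []).1, (altGo f (i - 1) (rem - i) []).2) := by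
        simp only [altGo, if_pos h]
        rw [altGo_acc f (i - 1) (rem - i) ([] ++ [-i])]
        simp
      obtain ⟨h1, h2, h3, h4, h5, h6⟩ := ih (i - 1) (rem - i) (by push_cast at hf ⊢; omega) (by omega)
      rw [hrw]
      refine ⟨?_, by simpa using h2.trans (by omega), fun _ => h3 (by omega), h4, h5,
        fun hlt => absurd hlt (by omega)⟩
      rw [PySem.List.pyRange_neg_one_cons (by omega : (altGo f (i - 1) (rem - i) []).2.1 < i)]
      simp [h1]
    · have hrw : altGo (f + 1) i rem [] = ([], i, rem) := by simp [altGo, h]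
      rw [hrw]
      exact ⟨by simp [PySem.List.pyRange_neg_one_eq_nil le_rfl], le_refl _, fun h0 => h0, hr, h,
        fun _ => rfl⟩

-- A's greedy loop: once nothing more fits (m - c ≤ 0) the state never changes
theorem foldA_zero (m : Int) (l : List Int) (h1 : ∀ x ∈ l, 1 ≤ x) :
    ∀ (s : PySem.Set Int) (c : Int), m - c ≤ 0 →
      l.foldl (greedyStep m) (s, c) = (s, c) := by
  induction l with
  | nil => intro s c _; rfl
  | cons x t ih =>
    intro s c hc
    have hx : 1 ≤ x := h1 x (by simp)
    have : greedyStep m (s, c) x = (s, c) := by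
      simp only [greedyStep]; rw [if_neg (by omega)]
    simp only [List.foldl_cons, this]
    exact ih (fun y hy => h1 y (by simp [hy])) s c hc

-- A's greedy loop in the skip phase: with 0 < m - c < i the only further take is m - c itself
theorem foldA_skip (m : Int) : ∀ (k : Nat) (i : Int) (s : PySem.Set Int) (c : Int),
    i ≤ (k : Int) → 0 < m - c → m - c < i → (∀ x ∈ s, m - c < x) →
    (PySem.List.pyRange i 0 (-1)).foldl (greedyStep m) (s, c) = (s ++ [m - c], m) := by
  intro k
  induction k with
  | zero => intro i s c hk h1 h2 _; exfalso; push_cast at hk; omega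
  | succ k ih =>
    intro i s c hk h1 h2 hs
    rw [PySem.List.pyRange_neg_one_cons (by omega : (0:Int) < i)]
    have hstep : greedyStep m (s, c) i = (s, c) := by
      simp only [greedyStep]; rw [if_neg (by omega)]
    simp only [List.foldl_cons, hstep]
    by_cases hcase : m - c < i - 1
    · exact ih (i - 1) s c (by push_cast at hk ⊢; omega) h1 hcase hs
    · -- m - c = i - 1 : the next element is taken, then nothing more fits
      have he : m - c = i - 1 := by omega
      rw [PySem.List.pyRange_neg_one_cons (by omega : (0:Int) < i - 1)]
      have htake : greedyStep m (s, c) (i - 1) = (s ++ [i - 1], c + (i - 1)) := by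
        simp only [greedyStep]
        rw [if_pos (by omega)]
        have : (i - 1) ∉ s := fun hmem => by have := hs _ hmem; omega
        rw [PySem.Set.add_of_not_mem this]
      simp only [List.foldl_cons, htake]
      rw [foldA_zero m _ (fun x hx => by
            have := (PySem.List.mem_pyRange_neg_one).1 hx; omega) _ _ (by omega)]
      rw [he]
      congr 1
      omega

-- A's greedy loop equals the altGo characterisation
theorem foldA_take (m : Int) : ∀ (f : Nat) (i : Int) (s : PySem.Set Int) (c : Int),
    i ≤ (f : Int) → 0 ≤ m - c → (∀ x ∈ s, i < x) →
    (PySem.List.pyRange i 0 (-1)).foldl (greedyStep m) (s, c) =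
      (if 0 < (altGo f i (m - c) []).2.2 ∧ 1 ≤ (altGo f i (m - c) []).2.1
       then (s ++ (altGo f i (m - c) []).1.map (fun x => -x) ++ [(altGo f i (m - c) []).2.2], m)
       else (s ++ (altGo f i (m - c) []).1.map (fun x => -x), m - (altGo f i (m - c) []).2.2)) := by
  intro f
  induction f with
  | zero =>
    intro i s c hf hc hs
    have hi : i ≤ 0 := by push_cast at hf; omega
    rw [PySem.List.pyRange_neg_one_eq_nil hi]
    have : altGo 0 i (m - c) [] = ([], i, m - c) := rfl
    rw [this]
    rw [if_neg (by intro hcon; simp at hcon; omega)]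
    simp
  | succ f ih =>
    intro i s c hf hc hs
    by_cases h : 1 ≤ i ∧ i ≤ m - c
    · -- take branch
      have hrw : altGo (f + 1) i (m - c) [] = ((-i) :: (altGo f (i - 1) (m - c - i) []).1, (altGo f (i - 1) (m - c - i) []).2) := by
        simp only [altGo, if_pos h]
        rw [altGo_acc f (i - 1) (m - c - i) ([] ++ [-i])]
        simp
      rw [PySem.List.pyRange_neg_one_cons (by omega : (0:Int) < i)]
      have htake : greedyStep m (s, c) i = (s ++ [i], c + i) := by
        simp only [greedyStep]
        rw [if_pos (by omega)]
        have : i ∉ s := fun hmem => by have := hs _ hmem; omega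
        rw [PySem.Set.add_of_not_mem this]
      simp only [List.foldl_cons, htake]
      have hmc : m - (c + i) = m - c - i := by ring
      have := ih (i - 1) (s ++ [i]) (c + i)
        (by push_cast at hf ⊢; omega) (by omega)
        (fun x hx => by rcases List.mem_append.1 hx with hx | hx
                        · have := hs _ hx; omega
                        · simp at hx; omega)
      rw [hmc] at this
      rw [this, hrw]
      by_cases hcond : 0 < (altGo f (i - 1) (m - c - i) []).2.2 ∧ 1 ≤ (altGo f (i - 1) (m - c - i) []).2.1
      · rw [if_pos hcond, if_pos hcond]; simp
      · rw [if_neg hcond, if_neg hcond]; simp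
    · -- guard fails at once
      have hrw : altGo (f + 1) i (m - c) [] = ([], i, m - c) := by simp [altGo, h]
      rw [hrw]
      by_cases hi : 1 ≤ i
      · -- skip phase: m - c < i
        have hlt : m - c < i := by omega
        by_cases hpos : 0 < m - c
        · rw [foldA_skip m (f + 1) i s c (by push_cast; omega) hpos hlt
              (fun x hx => by have := hs _ hx; omega)]
          rw [if_pos (by simp; omega)]
          simp
        · have hz : m - c = 0 := by omega
          rw [foldA_zero m _ (fun x hx => by
                have := (PySem.List.mem_pyRange_neg_one).1 hx; omega) _ _ (by omega)]
          rw [if_neg (by intro hcon; simp at hcon; omega)]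
          simp
      · -- empty range
        rw [PySem.List.pyRange_neg_one_eq_nil (by omega)]
        rw [if_neg (by intro hcon; simp at hcon; omega)]
        simp

-- A's merge loop: the negatives (all from values ≥ 1) are drained from the front,
-- then the positives from the back
theorem foldMerge : ∀ (L res negs poss : List Int),
    negs.length + poss.length ≤ L.length →
    (∀ x ∈ negs, 1 ≤ x) → (∀ x ∈ poss, 1 ≤ x) →
    L.foldl (fun st _ => mergeStep st) (res, negs, poss)
      = (res ++ negs.map (fun x => -x) ++ poss.reverse, [], []) := by
  intro L
  induction L with
  | nil =>
    intro res negs poss hlen _ _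
    have h1 : negs = [] := by cases negs <;> simp_all
    have h2 : poss = [] := by cases poss <;> simp_all
    subst h1; subst h2; simp
  | cons a L ih =>
    intro res negs poss hlen hneg hpos
    match negs, poss with
    | [], [] =>
      have hstep : mergeStep (res, ([] : List Int), ([] : List Int)) = (res, [], []) := rfl
      simp only [List.foldl_cons, hstep]
      simpa using ih res [] [] (by simp) (by simp) (by simp)
    | x :: xs, [] =>
      have hstep : mergeStep (res, x :: xs, ([] : List Int)) = (res ++ [-x], xs, []) := rfl
      simp only [List.foldl_cons, hstep]
      rw [ih (res ++ [-x]) xs [] (by simp at hlen ⊢; omega)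
          (fun y hy => hneg y (by simp [hy])) (by simp)]
      simp
    | [], p :: ps =>
      have hstep : mergeStep (res, ([] : List Int), p :: ps)
          = (res ++ [(p :: ps).getLast (by simp)], [], (p :: ps).dropLast) := rfl
      simp only [List.foldl_cons, hstep]
      rw [ih (res ++ [(p :: ps).getLast (by simp)]) [] ((p :: ps).dropLast)
          (by simp at hlen ⊢; omega) (by simp)
          (fun y hy => hpos y (List.dropLast_subset _ hy))]
      have : (p :: ps).reverse = (p :: ps).getLast (by simp) :: (p :: ps).dropLast.reverse := by
        conv_lhs => rw [← List.dropLast_append_getLast (l := p :: ps) (by simp)]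
        simp
      rw [this]
      simp
    | x :: xs, p :: ps =>
      have hle : -x ≤ (p :: ps).getLast (by simp) := by
        have h1 : 1 ≤ x := hneg x (by simp)
        have h2 : 1 ≤ (p :: ps).getLast (by simp) := hpos _ (List.getLast_mem _)
        omega
      have hstep : mergeStep (res, x :: xs, p :: ps) = (res ++ [-x], xs, p :: ps) := by
        simp only [mergeStep]; rw [if_pos hle]
      simp only [List.foldl_cons, hstep]
      rw [ih (res ++ [-x]) xs (p :: ps) (by simp at hlen ⊢; omega)
          (fun y hy => hneg y (by simp [hy])) hpos]
      simp

-- ===== VERDICT (by name: the statement is the Claim_ definition above) =====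
theorem lexSmallestNegatedPerm_spec : Claim_equal_lexSmallestNegatedPerm := by
  intro n target _
  unfold Spec_lexSmallestNegatedPerm
  simp only [lexSmallestNegatedPerm, lexSmallestNegatedPerm_alt]
  by_cases h1 : PySem.Int.floordiv (n * (n + 1)) 2 - target < 0 ∨
      PySem.Int.mod (PySem.Int.floordiv (n * (n + 1)) 2 - target) 2 ≠ 0
  · rw [if_pos h1, if_pos h1]
  · rw [if_neg h1, if_neg h1]
    have hd : 0 ≤ PySem.Int.floordiv (n * (n + 1)) 2 - target := by
      rcases not_or.1 h1 with ⟨h, _⟩; omega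
    set S := PySem.Int.floordiv (n * (n + 1)) 2 with hSdef
    set m := PySem.Int.floordiv (S - target) 2 with hmdef
    have hm0 : 0 ≤ m := by
      rw [hmdef, PySem.Int.floordiv_eq_ediv_of_pos (by norm_num)]
      exact Int.ediv_nonneg hd (by norm_num)
    by_cases h2 : S < m
    · rw [if_pos (Or.inr h2), if_pos h2]
    · rw [if_neg (by rintro (hx | hx) <;> omega), if_neg h2]
      -- main case: characterise A's greedy fold through altGo
      have hfold := foldA_take m n.toNat n PySem.Set.empty 0
        (by exact_mod_cast Int.self_le_toNat n) (by omega)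
        (by intro x hx; simp [PySem.Set.empty] at hx)
      rw [sub_zero] at hfold
      have hspec := altGo_spec n.toNat n m (by exact_mod_cast Int.self_le_toNat n) hm0
      rcases hR : altGo n.toNat n m [] with ⟨negs, i', rem'⟩
      rw [hR] at hfold hspec
      obtain ⟨hR1, hRle, hR0, hRrem, hRstop, hRsmall⟩ := hspec
      simp only at hR1 hRle hR0 hRrem hRstop hRsmall
      have hB : altLoop n m [] = (negs, i', rem') := hR
      rw [hB]
      simp only []
      by_cases hC : 0 < rem' ∧ 1 ≤ i'
      · -- residual value rem' is placed in the negative block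
        rw [if_pos (by simp; omega)] at hfold
        simp only at hfold
        rw [hfold]
        have hrlt : rem' < i' := by omega
        simp only [PySem.Set.empty, List.nil_append]
        rw [if_neg (by simp), if_pos hC.1, if_neg (by omega)]
        have hNmap : negs.map (fun x => -x) = PySem.List.pyRange n i' (-1) := by
          rw [hR1, List.map_map]; simp
        rw [hNmap]
        set posAsc := (PySem.List.pyRange 1 (i' + 1) 1).filter (fun j => j != rem') with hposAsc
        have hsortN : PySem.List.sorted (PySem.List.pyRange n i' (-1) ++ [rem']) (fun x => x) true
            = PySem.List.pyRange n i' (-1) ++ [rem'] := by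
          refine PySem.List.sorted_rev_eq_self_of_pairwise _ _ ?_
          rw [List.pairwise_append]
          refine ⟨pw_negBlock n i', List.pairwise_singleton _ _, ?_⟩
          intro x hx y hy
          rcases PySem.List.mem_pyRange_neg_one.1 hx with ⟨hx1, _⟩
          simp at hy; omega
        have hmem : ∀ a : Int, a ∈ posAsc.reverse ↔
            a ∈ (PySem.Set.ofList (PySem.List.pyRange 1 (n + 1) 1)).diff
                (PySem.List.pyRange n i' (-1) ++ [rem']) := by
          intro a
          rw [List.mem_reverse, hposAsc, List.mem_filter, PySem.Set.mem_diff,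
            PySem.Set.mem_ofList, PySem.List.mem_pyRange_one, PySem.List.mem_pyRange_one]
          simp only [List.mem_append, PySem.List.mem_pyRange_neg_one, List.mem_singleton,
            bne_iff_ne, ne_eq]
          omega
        have hsortP : PySem.List.sorted
            ((PySem.Set.ofList (PySem.List.pyRange 1 (n + 1) 1)).diff
              (PySem.List.pyRange n i' (-1) ++ [rem'])) (fun x => x) true = posAsc.reverse := by
          refine PySem.List.sorted_rev_eq_of_perm_of_pairwise_gt _ _ _ ?_ ?_
          · exact (List.perm_ext_iff_of_nodup
              (List.nodup_reverse.mpr ((PySem.List.nodup_pyRange_one _ _).filter _))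
              (PySem.Set.nodup_diff _ _ (PySem.Set.nodup_ofList _))).mpr hmem
          · exact List.pairwise_reverse.mpr
              ((PySem.List.pairwise_lt_pyRange_one 1 (i' + 1)).filter _)
        rw [hsortN, hsortP]
        have hlen : (PySem.List.pyRange n i' (-1) ++ [rem']).length + posAsc.reverse.length
            ≤ (PySem.List.pyRange 0 n 1).length := by
          have hl1 : posAsc.length < (PySem.List.pyRange 1 (i' + 1) 1).length :=
            length_filter_lt (x := rem') (PySem.List.mem_pyRange_one.mpr (by omega)) (by simp)
          simp only [PySem.List.length_pyRange_one, PySem.List.length_pyRange_neg_one,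
            List.length_append, List.length_reverse, List.length_cons, List.length_nil] at hl1 ⊢
          omega
        have hneg1 : ∀ x ∈ PySem.List.pyRange n i' (-1) ++ [rem'], (1:Int) ≤ x := by
          intro x hx
          rcases List.mem_append.1 hx with hx | hx
          · rcases PySem.List.mem_pyRange_neg_one.1 hx with ⟨hx1, _⟩; omega
          · simp at hx; omega
        have hpos1 : ∀ x ∈ posAsc.reverse, (1:Int) ≤ x := by
          intro x hx
          rw [List.mem_reverse, hposAsc, List.mem_filter] at hx
          rcases PySem.List.mem_pyRange_one.1 hx.1 with ⟨hx1, _⟩; omega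
        rw [foldMerge _ _ _ _ hlen hneg1 hpos1]
        simp [hR1]
      · -- no residual in the block: rem' = 0, or both return []
        rw [if_neg (by simp; omega)] at hfold
        simp only at hfold
        rw [hfold]
        by_cases hz : rem' = 0
        · subst hz
          rw [if_neg (by simp), if_neg (by simp)]
          simp only [PySem.Set.empty, List.nil_append]
          have h0i : 0 ≤ i' ∨ i' = n := by
            by_cases hn1 : n < 1
            · exact Or.inr (hRsmall hn1)
            · exact Or.inl (hR0 (by omega))
          have hNmap : negs.map (fun x => -x) = PySem.List.pyRange n i' (-1) := by
            rw [hR1, List.map_map]; simp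
          rw [hNmap]
          set posAsc := (PySem.List.pyRange 1 (i' + 1) 1).filter (fun j => j != (0:Int)) with hposAsc
          have hsortN : PySem.List.sorted (PySem.List.pyRange n i' (-1)) (fun x => x) true
              = PySem.List.pyRange n i' (-1) :=
            PySem.List.sorted_rev_eq_self_of_pairwise _ _ (pw_negBlock n i')
          have hmem : ∀ a : Int, a ∈ posAsc.reverse ↔
              a ∈ (PySem.Set.ofList (PySem.List.pyRange 1 (n + 1) 1)).diff
                  (PySem.List.pyRange n i' (-1)) := by
            intro a
            rw [List.mem_reverse, hposAsc, List.mem_filter, PySem.Set.mem_diff,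
              PySem.Set.mem_ofList, PySem.List.mem_pyRange_one, PySem.List.mem_pyRange_one]
            simp only [PySem.List.mem_pyRange_neg_one, bne_iff_ne, ne_eq]
            omega
          have hsortP : PySem.List.sorted
              ((PySem.Set.ofList (PySem.List.pyRange 1 (n + 1) 1)).diff
                (PySem.List.pyRange n i' (-1))) (fun x => x) true = posAsc.reverse := by
            refine PySem.List.sorted_rev_eq_of_perm_of_pairwise_gt _ _ _ ?_ ?_
            · exact (List.perm_ext_iff_of_nodup
                (List.nodup_reverse.mpr ((PySem.List.nodup_pyRange_one _ _).filter _))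
                (PySem.Set.nodup_diff _ _ (PySem.Set.nodup_ofList _))).mpr hmem
            · exact List.pairwise_reverse.mpr
                ((PySem.List.pairwise_lt_pyRange_one 1 (i' + 1)).filter _)
          rw [hsortN, hsortP]
          have hlen : (PySem.List.pyRange n i' (-1)).length + posAsc.reverse.length
              ≤ (PySem.List.pyRange 0 n 1).length := by
            have hl1 : posAsc.length ≤ (PySem.List.pyRange 1 (i' + 1) 1).length :=
              List.length_filter_le _ _
            simp only [PySem.List.length_pyRange_one, PySem.List.length_pyRange_neg_one,
              List.length_reverse] at hl1 ⊢
            rcases h0i with h0i | h0i <;> omega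
          have hneg1 : ∀ x ∈ PySem.List.pyRange n i' (-1), (1:Int) ≤ x := by
            intro x hx
            rcases PySem.List.mem_pyRange_neg_one.1 hx with ⟨hx1, hx2⟩
            rcases h0i with h0i | h0i <;> omega
          have hpos1 : ∀ x ∈ posAsc.reverse, (1:Int) ≤ x := by
            intro x hx
            rw [List.mem_reverse, hposAsc, List.mem_filter] at hx
            rcases PySem.List.mem_pyRange_one.1 hx.1 with ⟨hx1, _⟩; omega
          rw [foldMerge _ _ _ _ hlen hneg1 hpos1]
          simp [hR1]
        · -- rem' > 0 and i' < 1: both programs return []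
          rw [if_pos (by simp; omega), if_pos (by omega), if_pos (by omega)]
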